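-- pv_equiv track=rewrite | github.com/portnoyslp/advent-of-code | 2023/day6.py | num_ways_to_beat
-- ===== SOURCE A (Python) =====
-- def num_ways_to_beat(time, dist):
--     # use binary search to find first instance where x*(time - x) > dist
--     low = 0
--     high = time // 2;
--     while low < high:
--         mid = (low + high) // 2
--         cur_dist = mid * (time - mid)
--         if cur_dist > dist:
--             high = mid - 1
--         else:
--             low = mid + 1
--     # if low is too low, adjust.
--     if (low*(time - low) <= dist):
--         low += 1
--     return time + 1 - low * 2
-- ===== SOURCE B (Python) =====
-- def num_ways_to_beat(time, dist):
--     # linear upward scan for the first x in [0, time//2] with x*(time-x) > dist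
--     low = 0
--     while low < time // 2 and low * (time - low) <= dist:
--         low += 1
--     if low * (time - low) <= dist:
--         low += 1
--     return time + 1 - low * 2
-- ===== Notes on version B (the rewrite author's own statement) =====
-- stated objective: simpler
-- what changed: Replaced the binary search over [0, time//2] with a plain upward linear scan that stops at the first x with x*(time-x) > dist, keeping the same final adjust and the symmetric count formula time+1-2*low.
import Mathlib
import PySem

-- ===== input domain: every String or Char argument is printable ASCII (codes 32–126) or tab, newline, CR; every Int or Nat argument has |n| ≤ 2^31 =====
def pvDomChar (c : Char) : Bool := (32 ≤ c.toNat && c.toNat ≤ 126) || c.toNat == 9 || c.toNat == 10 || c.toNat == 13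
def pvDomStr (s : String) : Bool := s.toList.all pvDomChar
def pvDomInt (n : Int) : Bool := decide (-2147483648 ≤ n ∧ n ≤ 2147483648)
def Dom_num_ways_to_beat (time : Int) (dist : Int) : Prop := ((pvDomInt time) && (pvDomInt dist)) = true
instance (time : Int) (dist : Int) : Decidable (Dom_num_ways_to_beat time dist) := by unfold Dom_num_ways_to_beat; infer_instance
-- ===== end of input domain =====

-- B replaces A's binary search by a plain upward linear scan for the first winning x (objective: simpler).

-- ===== PORT A =====
-- A's while-loop: binary search on [low, high]
def pvALoop (time : Int) (dist : Int) (low : Int) (high : Int) : Int :=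
  if low < high then
    let mid := PySem.Int.floordiv (low + high) 2
    let cur_dist := mid * (time - mid)
    if cur_dist > dist then pvALoop time dist low (mid - 1)
    else pvALoop time dist (mid + 1) high
  else low
termination_by (high - low).toNat
decreasing_by
  · have h := PySem.Int.floordiv_two_mid_bounds (lo := low) (hi := high) (by omega)
    omega
  · have h := PySem.Int.floordiv_two_mid_bounds (lo := low) (hi := high) (by omega)
    omega

def num_ways_to_beat (time : Int) (dist : Int) : Int :=
  let high := PySem.Int.floordiv time 2
  let low := pvALoop time dist 0 high
  let low2 := if low * (time - low) ≤ dist then low + 1 else low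
  time + 1 - low2 * 2

-- ===== PORT B =====
-- B's while-loop: linear upward scan while low < time//2 and low*(time-low) <= dist
def pvBLoop (time : Int) (dist : Int) (low : Int) : Int :=
  if low < PySem.Int.floordiv time 2 ∧ low * (time - low) ≤ dist then
    pvBLoop time dist (low + 1)
  else low
termination_by (PySem.Int.floordiv time 2 - low).toNat
decreasing_by omega

def num_ways_to_beat_alt (time : Int) (dist : Int) : Int :=
  let low := pvBLoop time dist 0
  let low2 := if low * (time - low) ≤ dist then low + 1 else low
  time + 1 - low2 * 2

-- ===== PRECONDITION & SPEC =====
def Spec_num_ways_to_beat (time : Int) (dist : Int) (out : Int) : Prop := out = num_ways_to_beat_alt time dist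
instance (time : Int) (dist : Int) (out : Int) : Decidable (Spec_num_ways_to_beat time dist out) := by unfold Spec_num_ways_to_beat; infer_instance

-- ===== CLAIM (what is proved, stated in full; the proofs are below) =====
def Claim_equal_num_ways_to_beat : Prop := ∀ (time : Int) (dist : Int), Dom_num_ways_to_beat time dist → Spec_num_ways_to_beat time dist (num_ways_to_beat time dist)

-- ===== LEMMAS AND PROOFS =====

-- the loser set is downward closed on [0, time//2]
lemma pv_mono (time dist x y : Int) (_hx : 0 ≤ x) (hxy : x ≤ y)
    (hy : y ≤ PySem.Int.floordiv time 2) (h : y * (time - y) ≤ dist) :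
    x * (time - x) ≤ dist := by
  have h2 : PySem.Int.floordiv time 2 = time / 2 :=
    PySem.Int.floordiv_eq_ediv_of_pos (by omega)
  rw [h2] at hy
  have ht : 2 * (time / 2) ≤ time := by omega
  nlinarith [mul_nonneg (sub_nonneg.2 hxy) (by nlinarith : (0:Int) ≤ time - x - y)]

-- characterization of A's binary search
lemma pvALoop_spec (time dist : Int) : ∀ (low high : Int), 0 ≤ low → low ≤ high + 1 →
    low ≤ PySem.Int.floordiv time 2 → high ≤ PySem.Int.floordiv time 2 →
    (∀ x, 0 ≤ x → x < low → x * (time - x) ≤ dist) →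
    (∀ x, high < x → x ≤ PySem.Int.floordiv time 2 → dist < x * (time - x)) →
    0 ≤ pvALoop time dist low high ∧ pvALoop time dist low high ≤ PySem.Int.floordiv time 2 ∧
    (∀ x, 0 ≤ x → x < pvALoop time dist low high → x * (time - x) ≤ dist) ∧
    (∀ x, pvALoop time dist low high < x → x ≤ PySem.Int.floordiv time 2 → dist < x * (time - x)) := by
  intro low high
  induction low, high using pvALoop.induct time dist with
  | case1 low high hlt mid cur hgt ih =>
    intro h0 hlh hl2 hh hlo hhi
    have hb : low ≤ mid ∧ mid ≤ high :=
      PySem.Int.floordiv_two_mid_bounds (by omega)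
    have heq : pvALoop time dist low high = pvALoop time dist low (mid - 1) := by
      rw [pvALoop, if_pos hlt]
      exact if_pos hgt
    rw [heq]
    refine ih h0 (by omega) hl2 (by omega) hlo ?_
    intro x hx1 hx2
    rcases lt_or_ge high x with h' | h'
    · exact hhi x h' hx2
    · by_contra hcon
      have hc : mid * (time - mid) ≤ dist :=
        pv_mono time dist mid x (by omega) (by omega) hx2 (not_lt.1 hcon)
      exact absurd hgt (not_lt.2 hc)
  | case2 low high hlt mid cur hgt ih =>
    intro h0 hlh hl2 hh hlo hhi
    have hb : low ≤ mid ∧ mid ≤ high :=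
      PySem.Int.floordiv_two_mid_bounds (by omega)
    have hmidlt : mid < high :=
      (PySem.Int.floordiv_lt_iff_lt_mul (a := low + high) (b := 2) (q := high) (by omega)).mpr (by omega)
    have heq : pvALoop time dist low high = pvALoop time dist (mid + 1) high := by
      rw [pvALoop, if_pos hlt]
      exact if_neg hgt
    rw [heq]
    refine ih (by omega) (by omega) (by omega) hh ?_ hhi
    intro x hx1 hx2
    exact pv_mono time dist x mid hx1 (by omega) (by omega) (not_lt.1 hgt)
  | case3 low high hlt =>
    intro h0 hlh hl2 hh hlo hhi
    rw [pvALoop, if_neg hlt]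
    exact ⟨h0, hl2, hlo, fun x hx1 hx2 => hhi x (by omega) hx2⟩

-- characterization of B's linear scan
lemma pvBLoop_spec (time dist : Int) : ∀ (low : Int), 0 ≤ low →
    low ≤ PySem.Int.floordiv time 2 →
    (∀ x, 0 ≤ x → x < low → x * (time - x) ≤ dist) →
    0 ≤ pvBLoop time dist low ∧ pvBLoop time dist low ≤ PySem.Int.floordiv time 2 ∧
    (∀ x, 0 ≤ x → x < pvBLoop time dist low → x * (time - x) ≤ dist) ∧
    (pvBLoop time dist low < PySem.Int.floordiv time 2 →
      dist < pvBLoop time dist low * (time - pvBLoop time dist low)) := by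
  intro low
  induction low using pvBLoop.induct time dist with
  | case1 low hc ih =>
    intro h0 hle hlo
    rw [pvBLoop, if_pos hc]
    apply ih (by omega) (by omega)
    intro x hx1 hx2
    rcases lt_or_ge x low with h' | h'
    · exact hlo x hx1 h'
    · have hx : x = low := by omega
      subst hx; exact hc.2
  | case2 low hc =>
    intro h0 hle hlo
    rw [pvBLoop, if_neg hc]
    refine ⟨h0, hle, hlo, fun hlt => ?_⟩
    rcases not_and_or.1 hc with h | h
    · omega
    · exact not_le.1 h

-- both characterizations pin down the same adjusted value
lemma pv_final (time dist rA rB : Int)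
    (hA0 : 0 ≤ rA) (hA1 : rA ≤ PySem.Int.floordiv time 2)
    (hAlo : ∀ x, 0 ≤ x → x < rA → x * (time - x) ≤ dist)
    (hAhi : ∀ x, rA < x → x ≤ PySem.Int.floordiv time 2 → dist < x * (time - x))
    (hB0 : 0 ≤ rB) (hB1 : rB ≤ PySem.Int.floordiv time 2)
    (hBlo : ∀ x, 0 ≤ x → x < rB → x * (time - x) ≤ dist)
    (hBw : rB < PySem.Int.floordiv time 2 → dist < rB * (time - rB)) :
    (if rA * (time - rA) ≤ dist then rA + 1 else rA)
      = (if rB * (time - rB) ≤ dist then rB + 1 else rB) := by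
  rcases lt_trichotomy rA rB with h | h | h
  · have hAl : rA * (time - rA) ≤ dist := hBlo rA hA0 h
    have hstep : rB = rA + 1 := by
      by_contra hne
      have h1 : rA + 1 < rB := by omega
      have hw := hAhi (rA + 1) (by omega) (by omega)
      have hl := hBlo (rA + 1) (by omega) h1
      omega
    have hBwin : dist < rB * (time - rB) := hAhi rB h hB1
    rw [if_pos hAl, if_neg (not_le.2 hBwin), hstep]
  · rw [h]
  · exfalso
    have hl : rB * (time - rB) ≤ dist := hAlo rB hB0 h
    have hw := hBw (by omega)
    omega

-- ===== VERDICT (by name: the statement is the Claim_ definition above) =====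
theorem num_ways_to_beat_spec : Claim_equal_num_ways_to_beat := by
  intro time dist _
  unfold Spec_num_ways_to_beat num_ways_to_beat num_ways_to_beat_alt
  rcases lt_or_ge (PySem.Int.floordiv time 2) 0 with hneg | hpos
  · -- time // 2 < 0: neither loop runs; both sides are the same expression in low = 0
    have hA : pvALoop time dist 0 (PySem.Int.floordiv time 2) = 0 := by
      rw [pvALoop, if_neg (by omega)]
    have hB : pvBLoop time dist 0 = 0 := by
      rw [pvBLoop, if_neg (by rintro ⟨h, -⟩; omega)]
    simp only [hA, hB]
  · have hAspec := pvALoop_spec time dist 0 (PySem.Int.floordiv time 2)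
      le_rfl (by omega) hpos le_rfl (by omega) (by omega)
    have hBspec := pvBLoop_spec time dist 0 le_rfl hpos (by omega)
    obtain ⟨hA0, hA1, hAlo, hAhi⟩ := hAspec
    obtain ⟨hB0, hB1, hBlo, hBw⟩ := hBspec
    have := pv_final time dist _ _ hA0 hA1 hAlo hAhi hB0 hB1 hBlo hBw
    simp only [this]
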